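-- pv_equiv track=rewrite | github.com/tan-eddie/google-code-jam-2019 | qualification/foregone_solution/foregone_solution.py | split_n
-- ===== SOURCE A (Python) =====
-- def split_n(n):
--   n_digits = str(n)
--   a = 0
--   b = 0
--
--   # Iterate through each digit of n, halving if we encouter a 4.
--   for i in range(len(n_digits)):
--     place_value = 10 ** (len(n_digits) - i - 1)
--     if n_digits[i] == "4":
--       a += 2 * place_value
--       b += 2 * place_value
--     else:
--       a += int(n_digits[i]) * place_value
--
--   return (a, b)
-- ===== SOURCE B (Python) =====
-- def split_n(n):
--     # Pre_ excludes negative n, on which the original raises ValueError (int('-')).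
--     b = 0
--     p = 1
--     m = n
--     while m > 0:
--         if m % 10 == 4:
--             b += 2 * p
--         p *= 10
--         m //= 10
--     return (n - b, b)
-- ===== Notes on version B (the rewrite author's own statement) =====
-- stated objective: alternative
-- what changed: B never converts n to a string: it extracts digits arithmetically (divmod by 10, least-significant first) accumulating only the '4'-contribution b, then derives a = n - b; A iterates over str(n) front-to-back with a per-digit int() parse accumulating both addends.
import Mathlib
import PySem

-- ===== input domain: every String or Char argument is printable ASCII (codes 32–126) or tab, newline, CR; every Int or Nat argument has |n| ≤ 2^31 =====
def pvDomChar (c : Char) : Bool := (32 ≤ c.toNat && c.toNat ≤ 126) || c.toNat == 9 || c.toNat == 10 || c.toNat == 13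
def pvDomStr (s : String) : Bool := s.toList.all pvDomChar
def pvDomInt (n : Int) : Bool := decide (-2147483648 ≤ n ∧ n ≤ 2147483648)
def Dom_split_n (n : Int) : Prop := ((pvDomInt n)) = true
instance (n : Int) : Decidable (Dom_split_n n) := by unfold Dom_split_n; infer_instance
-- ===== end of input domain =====

-- B extracts digits arithmetically (divmod by 10), accumulating only b, then a = n - b;
-- A iterates over str(n) with an int() parse per digit, accumulating both addends.

-- ===== PORT A =====
-- int(n_digits[i]) for a single character; outside Pre_ (negative n) Python raises ValueError, modelled by the getD 0 default
def pvVal (c : Char) : Int := (PySem.Int.ofStr? (String.ofList [c])).getD 0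

def split_n (n : Int) : Int × Int :=
  let s := (PySem.Int.toStr n).toList
  let L : Int := s.length
  (PySem.List.pyRange 0 L 1).foldl (fun (ab : Int × Int) i =>
    let pv : Int := 10 ^ (L - i - 1).toNat
    if PySem.List.pyGetD s i ' ' = '4' then (ab.1 + 2 * pv, ab.2 + 2 * pv)
    else (ab.1 + pvVal (PySem.List.pyGetD s i ' ') * pv, ab.2)) (0, 0)

-- ===== PORT B =====
-- the while loop: while m > 0: if m % 10 == 4: b += 2*p; p *= 10; m //= 10
-- fuel = m.toNat is a totality guard only: the loop runs at most m.toNat times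
def pvLoop : Nat → Int → Int → Int → Int
  | 0, _, _, b => b
  | f + 1, m, p, b =>
    if 0 < m then
      pvLoop f (PySem.Int.floordiv m 10) (p * 10)
        (if PySem.Int.mod m 10 = 4 then b + 2 * p else b)
    else b

def split_n_alt (n : Int) : Int × Int :=
  let b := pvLoop n.toNat n 1 0
  (n - b, b)

-- ===== PRECONDITION & SPEC =====
-- Pre_ excludes negative n, on which A raises ValueError (int('-') on the sign character of str(n)).
def Pre_split_n (n : Int) : Prop := 0 ≤ n
instance (n : Int) : Decidable (Pre_split_n n) := by unfold Pre_split_n; infer_instance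
def pvWitness_split_n : Int := (47)

def Spec_split_n (n : Int) (out : Int × Int) : Prop := out = split_n_alt n
instance (n : Int) (out : Int × Int) : Decidable (Spec_split_n n out) := by unfold Spec_split_n; infer_instance

-- ===== CLAIM (what is proved, stated in full; the proofs are below) =====
def Claim_equal_split_n : Prop := ∀ (n : Int), Dom_split_n n → Pre_split_n n → Spec_split_n n (split_n n)

-- ===== LEMMAS AND PROOFS =====

-- A's per-digit contribution to a (2*pv on '4', digit*pv otherwise), structurally over the digit list
def pvTA : List Char → Int
  | [] => 0
  | c :: t => (if c = '4' then 2 else pvVal c) * 10 ^ t.length + pvTA t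

-- the b-sum: 2*pv per '4'
def pvTB : List Char → Int
  | [] => 0
  | c :: t => (if c = '4' then 2 * 10 ^ t.length else 0) + pvTB t

lemma pvVal_digitChar (r : Nat) (h : r < 10) : pvVal (Nat.digitChar r) = r := by
  interval_cases r <;> decide

lemma toDigitsCore_append (b : Nat) : ∀ (f m : Nat) (ds : List Char),
    Nat.toDigitsCore b f m ds = Nat.toDigitsCore b f m [] ++ ds := by
  intro f
  induction f with
  | zero => intro m ds; simp [Nat.toDigitsCore]
  | succ f ih =>
      intro m ds
      simp only [Nat.toDigitsCore]
      by_cases h : m / b = 0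
      · simp [h]
      · simp only [if_neg h]
        rw [ih (m / b) (Nat.digitChar (m % b) :: ds), ih (m / b) [Nat.digitChar (m % b)]]
        simp

-- Horner value of a digit-character list
def pvH (cs : List Char) : Int := cs.foldl (fun acc c => 10 * acc + pvVal c) 0

lemma pvH_foldl_acc : ∀ (cs : List Char) (a : Int),
    cs.foldl (fun acc c => 10 * acc + pvVal c) a = a * 10 ^ cs.length + pvH cs := by
  intro cs
  induction cs with
  | nil => intro a; simp [pvH]
  | cons c t ih =>
      intro a
      simp only [pvH, List.foldl_cons]
      rw [ih, ih (10 * 0 + pvVal c)]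
      simp only [List.length_cons, pow_succ]
      ring

lemma pvH_append_singleton (cs : List Char) (c : Char) :
    pvH (cs ++ [c]) = 10 * pvH cs + pvVal c := by
  simp only [pvH, List.foldl_append, List.foldl_cons, List.foldl_nil]

lemma pvH_toDigitsCore : ∀ (f m : Nat), m < f →
    pvH (Nat.toDigitsCore 10 f m []) = m := by
  intro f
  induction f with
  | zero => intro m h; omega
  | succ f ih =>
      intro m h
      simp only [Nat.toDigitsCore]
      by_cases h10 : m / 10 = 0
      · simp only [if_pos h10]
        have hm : m < 10 := by omega
        rw [Nat.mod_eq_of_lt hm]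
        simp [pvH, pvVal_digitChar m hm]
      · simp only [if_neg h10]
        rw [toDigitsCore_append 10 f (m / 10) [Nat.digitChar (m % 10)]]
        rw [pvH_append_singleton, ih (m / 10) (by omega),
            pvVal_digitChar (m % 10) (Nat.mod_lt _ (by norm_num))]
        push_cast
        omega

lemma pvH_toDigits (m : Nat) : pvH (Nat.toDigits 10 m) = m :=
  pvH_toDigitsCore (m + 1) m (Nat.lt_succ_self m)

lemma pvH_cons (c : Char) (t : List Char) :
    pvH (c :: t) = pvVal c * 10 ^ t.length + pvH t := by
  have hl : pvH (c :: t)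
      = List.foldl (fun acc c => 10 * acc + pvVal c) (10 * 0 + pvVal c) t := rfl
  rw [hl, pvH_foldl_acc t (10 * 0 + pvVal c)]
  ring

lemma pvTA_add_pvTB : ∀ (cs : List Char), pvTA cs + pvTB cs = pvH cs := by
  intro cs
  induction cs with
  | nil => simp [pvTA, pvTB, pvH]
  | cons c t ih =>
      rw [pvH_cons]
      by_cases hc : c = '4'
      · subst hc
        have h4 : pvVal '4' = 4 := by decide
        simp only [pvTA, pvTB, h4]
        split_ifs with h
        · omega
        · exact absurd trivial h
      · simp only [pvTA, pvTB, if_neg hc] at *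
        omega

-- A's fold over enumerate, with the running place value tied to the suffix length
lemma foldA_gen (L : Int) : ∀ (cs : List Char) (k a b : Int), k + cs.length = L →
    (PySem.List.enumerate cs k).foldl (fun (ab : Int × Int) p =>
      if p.2 = '4' then (ab.1 + 2 * 10 ^ (L - p.1 - 1).toNat, ab.2 + 2 * 10 ^ (L - p.1 - 1).toNat)
      else (ab.1 + pvVal p.2 * 10 ^ (L - p.1 - 1).toNat, ab.2)) (a, b)
    = (a + pvTA cs, b + pvTB cs) := by
  intro cs
  induction cs with
  | nil => intro k a b _; simp [PySem.List.enumerate_nil, pvTA, pvTB]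
  | cons c t ih =>
      intro k a b hk
      rw [PySem.List.enumerate_cons]
      have hexp : (L - k - 1).toNat = t.length := by
        simp only [List.length_cons] at hk; omega
      simp only [List.foldl_cons, hexp]
      by_cases hc : c = '4'
      · simp only [if_pos hc]
        rw [ih (k + 1) _ _ (by simp only [List.length_cons] at hk; omega)]
        simp only [pvTA, pvTB, if_pos hc, Prod.mk.injEq]
        constructor <;> ring
      · simp only [if_neg hc]
        rw [ih (k + 1) _ _ (by simp only [List.length_cons] at hk; omega)]
        simp only [pvTA, pvTB, if_neg hc, Prod.mk.injEq]
        constructor <;> ring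

-- A's pyRange-and-index loop equals the enumerate fold (members of enumerate are in range)
lemma foldA_pyRange (s : List Char) :
    (PySem.List.pyRange 0 (s.length : Int) 1).foldl (fun (ab : Int × Int) i =>
      if PySem.List.pyGetD s i ' ' = '4' then
        (ab.1 + 2 * 10 ^ ((s.length : Int) - i - 1).toNat, ab.2 + 2 * 10 ^ ((s.length : Int) - i - 1).toNat)
      else (ab.1 + pvVal (PySem.List.pyGetD s i ' ') * 10 ^ ((s.length : Int) - i - 1).toNat, ab.2)) (0, 0)
    = (PySem.List.enumerate s 0).foldl (fun (ab : Int × Int) p =>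
      if p.2 = '4' then (ab.1 + 2 * 10 ^ ((s.length : Int) - p.1 - 1).toNat, ab.2 + 2 * 10 ^ ((s.length : Int) - p.1 - 1).toNat)
      else (ab.1 + pvVal p.2 * 10 ^ ((s.length : Int) - p.1 - 1).toNat, ab.2)) (0, 0) := by
  rw [PySem.List.enumerate_eq_map_pyRange (d := ' '), List.foldl_map]
  rfl

-- B-side: fuel irrelevance, accumulator reduction, and the link to the digit list
lemma pvLoop_nonpos (f : Nat) (m p b : Int) (h : ¬ 0 < m) : pvLoop f m p b = b := by
  cases f <;> simp [pvLoop, h]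

lemma pvLoop_fuel : ∀ (f g : Nat) (m p b : Int), m.toNat ≤ f → m.toNat ≤ g →
    pvLoop f m p b = pvLoop g m p b := by
  intro f
  induction f with
  | zero =>
      intro g m p b hf _
      have h : ¬ 0 < m := by omega
      rw [pvLoop_nonpos _ _ _ _ h, pvLoop_nonpos _ _ _ _ h]
  | succ f ih =>
      intro g m p b hf hg
      by_cases h : 0 < m
      · obtain ⟨g', rfl⟩ : ∃ g', g = g' + 1 := ⟨g - 1, by omega⟩
        simp only [pvLoop, if_pos h]
        have hd : PySem.Int.floordiv m 10 = m / 10 :=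
          PySem.Int.floordiv_eq_ediv_of_pos (by norm_num)
        apply ih
        · rw [hd]; omega
        · rw [hd]; omega
      · rw [pvLoop_nonpos _ _ _ _ h, pvLoop_nonpos _ _ _ _ h]

lemma pvLoop_acc : ∀ (f : Nat) (m p b : Int), m.toNat ≤ f →
    pvLoop f m p b = b + p * pvLoop f m 1 0 := by
  intro f
  induction f with
  | zero => intro m p b _; simp [pvLoop]
  | succ f ih =>
      intro m p b hf
      by_cases h : 0 < m
      · simp only [pvLoop, if_pos h]
        have hd : PySem.Int.floordiv m 10 = m / 10 :=
          PySem.Int.floordiv_eq_ediv_of_pos (by norm_num)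
        have hlt : (PySem.Int.floordiv m 10).toNat ≤ f := by rw [hd]; omega
        rw [ih _ (p * 10) _ hlt, ih _ (1 * 10) _ hlt]
        split_ifs <;> ring
      · rw [pvLoop_nonpos _ _ _ _ h, pvLoop_nonpos _ _ _ _ h]
        ring

lemma pvLoop_succ (f : Nat) (m p b : Int) :
    pvLoop (f + 1) m p b
      = if 0 < m then
          pvLoop f (PySem.Int.floordiv m 10) (p * 10)
            (if PySem.Int.mod m 10 = 4 then b + 2 * p else b)
        else b := rfl

lemma pvLoop_pos (f : Nat) (m : Int) (h : 0 < m) (hf : m.toNat ≤ f) :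
    pvLoop f m 1 0
      = (if PySem.Int.mod m 10 = 4 then 2 else 0) + 10 * pvLoop f (m / 10) 1 0 := by
  obtain ⟨f', rfl⟩ : ∃ f', f = f' + 1 := ⟨f - 1, by omega⟩
  rw [pvLoop_succ, if_pos h]
  have hd : PySem.Int.floordiv m 10 = m / 10 :=
    PySem.Int.floordiv_eq_ediv_of_pos (by norm_num)
  have hlt : (PySem.Int.floordiv m 10).toNat ≤ f' := by rw [hd]; omega
  rw [pvLoop_acc _ _ _ _ hlt, hd,
    pvLoop_fuel f' (f' + 1) (m / 10) 1 0 (by omega) (by omega)]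
  split_ifs <;> ring

lemma pvIf_digitChar (r : Nat) (h : r < 10) :
    (if Nat.digitChar r = '4' then (2 : Int) else 0) = (if (r : Int) = 4 then 2 else 0) := by
  interval_cases r <;> decide

lemma pvTB_append_singleton (cs : List Char) (c : Char) :
    pvTB (cs ++ [c]) = 10 * pvTB cs + (if c = '4' then 2 else 0) := by
  induction cs with
  | nil => simp [pvTB]
  | cons c0 t ih =>
      simp only [List.cons_append, pvTB, ih, List.length_append, List.length_cons,
        List.length_nil, pow_succ]
      split_ifs <;> ring

lemma pvTB_toDigitsCore : ∀ (f m : Nat), m < f →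
    pvTB (Nat.toDigitsCore 10 f m []) = pvLoop m (m : Int) 1 0 := by
  intro f
  induction f with
  | zero => intro m h; omega
  | succ f ih =>
      intro m h
      simp only [Nat.toDigitsCore]
      by_cases h10 : m / 10 = 0
      · simp only [if_pos h10]
        have hm : m < 10 := by omega
        rw [Nat.mod_eq_of_lt hm]
        by_cases hz : m = 0
        · subst hz; simp [pvTB, pvLoop]; decide
        · have hpos : 0 < (m : Int) := by exact_mod_cast Nat.pos_of_ne_zero hz
          rw [pvLoop_pos m (m : Int) hpos (by omega)]
          have hdiv : ((m : Int) / 10) = 0 := by omega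
          rw [hdiv, pvLoop_nonpos _ _ _ _ (by norm_num)]
          have hmod : PySem.Int.mod (m : Int) 10 = ((m % 10 : Nat) : Int) := by
            exact_mod_cast PySem.Int.mod_natCast m 10
          rw [hmod, Nat.mod_eq_of_lt hm]
          simp only [pvTB, List.length_nil, pow_zero, mul_one, add_zero, mul_zero]
          rw [pvIf_digitChar m hm]
      · simp only [if_neg h10]
        rw [toDigitsCore_append 10 f (m / 10) [Nat.digitChar (m % 10)],
          pvTB_append_singleton, ih (m / 10) (by omega)]
        have hpos : 0 < (m : Int) := by
          have : m ≠ 0 := by omega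
          exact_mod_cast Nat.pos_of_ne_zero this
        rw [pvLoop_pos m (m : Int) hpos (by omega)]
        have hdiv : ((m : Int) / 10) = ((m / 10 : Nat) : Int) := by omega
        have hmod : PySem.Int.mod (m : Int) 10 = ((m % 10 : Nat) : Int) := by
          exact_mod_cast PySem.Int.mod_natCast m 10
        rw [hdiv, hmod,
          pvLoop_fuel (m / 10) m ((m / 10 : Nat) : Int) 1 0 (by omega) (by omega)]
        rw [pvIf_digitChar (m % 10) (Nat.mod_lt _ (by norm_num))]
        ring

lemma pvTB_toDigits (m : Nat) : pvTB (Nat.toDigits 10 m) = pvLoop m (m : Int) 1 0 :=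
  pvTB_toDigitsCore (m + 1) m (Nat.lt_succ_self m)

theorem split_n_eq (n : Int) (hn : 0 ≤ n) : split_n n = split_n_alt n := by
  simp only [split_n, split_n_alt]
  set s := (PySem.Int.toStr n).toList with hs
  rw [foldA_pyRange s,
      foldA_gen (s.length : Int) s 0 0 0 (by simp)]
  have hdig : s = Nat.toDigits 10 n.toNat := by
    rw [hs, PySem.Int.toList_toStr]
    simp [PySem.Int.toChars, not_lt.mpr hn]
  have hH : pvH s = n := by
    rw [hdig, pvH_toDigits, Int.toNat_of_nonneg hn]
  have hB : pvTB s = pvLoop n.toNat n 1 0 := by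
    rw [hdig, pvTB_toDigits, Int.toNat_of_nonneg hn]
  have hsum := pvTA_add_pvTB s
  have hA : pvTA s = n - pvLoop n.toNat n 1 0 := by omega
  simp [hA, hB]

-- ===== VERDICT (by name: the statement is the Claim_ definition above) =====
theorem split_n_spec : Claim_equal_split_n := by
  intro n _ hpre
  unfold Spec_split_n
  exact split_n_eq n hpre
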